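-- pv_equiv track=rewrite | github.com/jay-thakur/geeksforgeeks_py | practice/Basic/minimal_summing_up.py | minimal_summing_up
-- ===== SOURCE A (Python) =====
-- def minimal_summing_up(n, x):
--     powers = [x ** (i - 1) for i in range(12, 0, -1)]
--     i = 0
--     d = n
--     sums = []
--     while d > 0:
--         while powers[i] > d:
--             i += 1
--         sums.append(i)
--         d -= powers[i]
--     return len(sums)
-- ===== SOURCE B (Python) =====
-- def minimal_summing_up(n, x):
--     # digit-sum formulation: greedy count = n // x**11 plus sum of base-x digits of n % x**11
--     if n <= 0:
--         return 0
--     count, r = divmod(n, x ** 11)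
--     while r:
--         count += r % x
--         r //= x
--     return count
-- ===== Notes on version B (the rewrite author's own statement) =====
-- stated objective: faster
-- what changed: Replaced the greedy loop that repeatedly subtracts the largest power of x (one iteration per summand, up to O(n) iterations) with the closed digit-sum form: n // x**11 plus the sum of base-x digits of n % x**11, computed by repeated divmod.
import Mathlib
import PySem

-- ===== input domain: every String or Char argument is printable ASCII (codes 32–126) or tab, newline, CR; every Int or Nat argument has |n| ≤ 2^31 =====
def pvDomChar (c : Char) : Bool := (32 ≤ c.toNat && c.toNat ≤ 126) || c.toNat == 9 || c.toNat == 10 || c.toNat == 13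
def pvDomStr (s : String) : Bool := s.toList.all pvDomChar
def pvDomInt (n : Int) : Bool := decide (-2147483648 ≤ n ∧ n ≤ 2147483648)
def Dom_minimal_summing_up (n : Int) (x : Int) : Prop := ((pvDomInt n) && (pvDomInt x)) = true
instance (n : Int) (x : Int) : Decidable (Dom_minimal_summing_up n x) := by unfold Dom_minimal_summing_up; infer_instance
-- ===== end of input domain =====

-- B replaces A's greedy power-subtraction loop (O(answer), up to O(n) iterations) by the closed
-- digit-sum form n // x**11 + sum of base-x digits of n % x**11 (O(log_x n)); objective: faster.


-- ===== PORT A =====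
-- powers = [x ** (i - 1) for i in range(12, 0, -1)]
def pvPowersA (x : Int) : List Int :=
  (PySem.List.pyRange 12 0 (-1)).map (fun i => x ^ (i - 1).toNat)

-- inner `while powers[i] > d: i += 1`; i is always ≥ 0 in Python, so Nat index with the
-- explicit bound check is exact (none = IndexError, outside Pre_).
def pvInnerA (P : List Int) (d : Int) (i : Nat) : Option Nat :=
  if h : i < P.length then
    if P.getD i 0 > d then pvInnerA P d (i + 1) else some i
  else none
termination_by P.length - i

-- outer `while d > 0` with fuel (only to make the port total; n.toNat + 1 steps always
-- suffice on Pre_, where each iteration subtracts at least 1); cnt = len(sums).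
def pvLoopA (P : List Int) : Nat → Nat → Int → Int → Int
  | 0, _, _, cnt => cnt
  | fuel + 1, i, d, cnt =>
    if d > 0 then
      match pvInnerA P d i with
      | none => cnt
      | some j => pvLoopA P fuel j (d - P.getD j 0) (cnt + 1)
    else cnt

def minimal_summing_up (n : Int) (x : Int) : Int :=
  pvLoopA (pvPowersA x) (n.toNat + 1) 0 n 0

-- ===== PORT B =====
-- `while r: count += r % x; r //= x` with fuel (r.toNat + 1 steps always suffice on Pre_).
def pvDigitsB (x : Int) : Nat → Int → Int → Int
  | 0, _, acc => acc
  | fuel + 1, r, acc =>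
    if r ≠ 0 then pvDigitsB x fuel (PySem.Int.floordiv r x) (acc + PySem.Int.mod r x) else acc

def minimal_summing_up_alt (n : Int) (x : Int) : Int :=
  if n ≤ 0 then 0
  else
    let count := PySem.Int.floordiv n (x ^ (11 : Nat))
    let r := PySem.Int.mod n (x ^ (11 : Nat))
    pvDigitsB x (r.toNat + 1) r count

-- ===== PRECONDITION & SPEC =====
-- A's outer loop never terminates when n > 0 and x ≤ 0 (it subtracts a non-positive power
-- forever); Pre_ excludes exactly those diverging inputs. On every input A returns on, Pre_ holds.
def Pre_minimal_summing_up (n : Int) (x : Int) : Prop := n ≤ 0 ∨ 1 ≤ x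
instance (n : Int) (x : Int) : Decidable (Pre_minimal_summing_up n x) := by
  unfold Pre_minimal_summing_up; infer_instance

def pvWitness_minimal_summing_up : Int × Int := (100, 3)

def Spec_minimal_summing_up (n : Int) (x : Int) (out : Int) : Prop := out = minimal_summing_up_alt n x
instance (n : Int) (x : Int) (out : Int) : Decidable (Spec_minimal_summing_up n x out) := by unfold Spec_minimal_summing_up; infer_instance

-- ===== CLAIM (what is proved, stated in full; the proofs are below) =====
def Claim_equal_minimal_summing_up : Prop := ∀ (n : Int) (x : Int), Dom_minimal_summing_up n x → Pre_minimal_summing_up n x → Spec_minimal_summing_up n x (minimal_summing_up n x)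

-- ===== LEMMAS AND PROOFS =====

lemma pv_ediv_lt_self (r x : Int) (hr : 0 < r) (hx : 2 ≤ x) : r / x < r := by
  have hdm := Int.mul_ediv_add_emod r x
  have hm : 0 ≤ r % x := Int.emod_nonneg r (by omega)
  have hq : 0 ≤ r / x := Int.ediv_nonneg (by omega) (by omega)
  nlinarith [hdm, hm, hq]

-- base-x digit sum (mathematical reference for both loops)
def pvS (x : Int) (r : Int) : Int :=
  if _h : 0 < r ∧ 2 ≤ x then r % x + pvS x (r / x) else 0
termination_by r.toNat
decreasing_by
  have h1 : r / x < r := pv_ediv_lt_self r x _h.1 _h.2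
  omega

lemma pvS_zero (x : Int) : pvS x 0 = 0 := by rw [pvS]; simp

lemma pvS_small (x e : Int) (hx : 2 ≤ x) (h0 : 0 ≤ e) (h1 : e < x) : pvS x e = e := by
  rw [pvS]
  by_cases h : 0 < e
  · rw [dif_pos ⟨h, hx⟩, Int.emod_eq_of_lt h0 h1, Int.ediv_eq_zero_of_lt h0 h1, pvS_zero]
    ring
  · rw [dif_neg (by omega)]; omega

lemma pvS_sub_pow (x : Int) (hx : 2 ≤ x) : ∀ (k : Nat) (d : Int), x ^ k ≤ d → d < x ^ (k + 1) →
    pvS x d = 1 + pvS x (d - x ^ k) := by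
  intro k
  induction k with
  | zero =>
    intro d h1 h2
    simp only [pow_zero, zero_add, pow_one] at h1 h2 ⊢
    rw [pvS_small x d hx (by omega) h2, pvS_small x (d - 1) hx (by omega) (by omega)]
    ring
  | succ k ih =>
    intro d h1 h2
    have hxpos : (0 : Int) < x := by omega
    have hpowpos : (0 : Int) < x ^ k := pow_pos hxpos k
    have hd : 0 < d := lt_of_lt_of_le (pow_pos hxpos (k + 1)) h1
    have hd' : 0 ≤ d - x ^ (k + 1) := by omega
    have hrepr : d - x ^ (k + 1) = d + x * (-(x ^ k)) := by ring
    have hmod : (d - x ^ (k + 1)) % x = d % x := by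
      rw [hrepr, Int.add_mul_emod_self_left]
    have hdiv : (d - x ^ (k + 1)) / x = d / x - x ^ k := by
      rw [hrepr, Int.add_mul_ediv_left d (-(x ^ k)) (by omega : x ≠ 0)]
      ring
    have hlo : x ^ k ≤ d / x := by
      rw [Int.le_ediv_iff_mul_le hxpos]
      calc x ^ k * x = x ^ (k + 1) := by ring
        _ ≤ d := h1
    have hhi : d / x < x ^ (k + 1) := by
      rw [Int.ediv_lt_iff_lt_mul hxpos]
      calc d < x ^ (k + 1 + 1) := h2
        _ = x ^ (k + 1) * x := by ring
    have ihd := ih (d / x) hlo hhi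
    have hSd : pvS x d = d % x + pvS x (d / x) := by
      conv_lhs => rw [pvS]
      rw [dif_pos ⟨hd, hx⟩]
    have hcast : pvS x ((d - x ^ (k + 1)) / x) = pvS x (d / x - x ^ k) := by rw [hdiv]
    by_cases hz : 0 < d - x ^ (k + 1)
    · have hSd' : pvS x (d - x ^ (k + 1)) =
          (d - x ^ (k + 1)) % x + pvS x ((d - x ^ (k + 1)) / x) := by
        conv_lhs => rw [pvS]
        rw [dif_pos ⟨hz, hx⟩]
      linarith [hSd, hSd', ihd, hmod, hcast]
    · have hz0 : d - x ^ (k + 1) = 0 := by omega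
      have hdx : d / x - x ^ k = 0 := by
        rw [← hdiv, hz0]
        simp
      have h0 : pvS x (d / x - x ^ k) = 0 := by rw [hdx, pvS_zero]
      have hm0 : d % x = 0 := by
        rw [← hmod, hz0]
        simp
      rw [hz0, pvS_zero]
      linarith [hSd, ihd, h0, hm0]

-- B's digit loop computes acc + pvS, given enough fuel
lemma pvDigitsB_eq (x : Int) (hx : 2 ≤ x) : ∀ (fuel : Nat) (r acc : Int), 0 ≤ r →
    r.toNat < fuel → pvDigitsB x fuel r acc = acc + pvS x r := by
  intro fuel
  induction fuel with
  | zero => intro r acc h0 hf; omega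
  | succ fuel ih =>
    intro r acc h0 hf
    by_cases hr : r = 0
    · subst hr; simp [pvDigitsB, pvS_zero]
    · have hrpos : 0 < r := by omega
      have hfd : PySem.Int.floordiv r x = r / x := PySem.Int.floordiv_eq_ediv_of_pos (by omega)
      have hmd : PySem.Int.mod r x = r % x := PySem.Int.mod_eq_emod_of_pos (by omega)
      have hlt : r / x < r := pv_ediv_lt_self r x hrpos hx
      have hge : 0 ≤ r / x := Int.ediv_nonneg (by omega) (by omega)
      have hSr : pvS x r = r % x + pvS x (r / x) := by
        conv_lhs => rw [pvS]
        rw [dif_pos ⟨hrpos, hx⟩]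
      rw [pvDigitsB, if_pos hr, hfd, hmd, ih (r / x) (acc + r % x) hge (by omega)]
      linarith [hSr]

lemma powers_eq (x : Int) :
    pvPowersA x = [x ^ 11, x ^ 10, x ^ 9, x ^ 8, x ^ 7, x ^ 6, x ^ 5, x ^ 4, x ^ 3, x ^ 2, x ^ 1, x ^ 0] := by
  rfl

lemma powers_length (x : Int) : (pvPowersA x).length = 12 := by rw [powers_eq]; rfl

lemma powers_getD (x : Int) (j : Nat) (hj : j < 12) :
    (pvPowersA x).getD j 0 = x ^ (11 - j) := by
  interval_cases j <;> rw [powers_eq] <;> rfl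

-- inner loop finds the least index ≥ i whose power is ≤ d (if any index ≥ i qualifies)
lemma pvInnerA_spec (P : List Int) (d : Int) : ∀ (i : Nat),
    (∃ j, i ≤ j ∧ j < P.length ∧ P.getD j 0 ≤ d) →
    ∃ j, pvInnerA P d i = some j ∧ i ≤ j ∧ j < P.length ∧ P.getD j 0 ≤ d ∧
      (∀ j', i ≤ j' → j' < j → P.getD j' 0 > d) := by
  intro i
  induction hk : P.length - i using Nat.strong_induction_on generalizing i with
  | _ k ih =>
    rintro ⟨j0, hij0, hj0len, hj0le⟩
    have hilen : i < P.length := by omega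
    rw [pvInnerA, dif_pos hilen]
    by_cases hgt : P.getD i 0 > d
    · have hne : i ≠ j0 := by rintro rfl; omega
      have hrec := ih (P.length - (i + 1)) (by omega) (i + 1) rfl
        ⟨j0, by omega, hj0len, hj0le⟩
      obtain ⟨j, hj1, hj2, hj3, hj4, hj5⟩ := hrec
      rw [if_pos hgt]
      refine ⟨j, hj1, by omega, hj3, hj4, ?_⟩
      intro j' hij' hj'j
      by_cases h : j' = i
      · subst h; exact hgt
      · exact hj5 j' (by omega) hj'j
    · rw [if_neg hgt]
      exact ⟨i, rfl, le_refl i, hilen, by omega, fun j' h1 h2 => by omega⟩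

-- greedy value in closed form
def pvG (x d : Int) : Int := d / x ^ (11 : Nat) + pvS x (d % x ^ (11 : Nat))

lemma pvG_zero (x : Int) : pvG x 0 = 0 := by simp [pvG, pvS_zero]

lemma pvG_step (x d : Int) (hx : 2 ≤ x) (hd : 0 < d) (j : Nat) (hj : j < 12)
    (hle : x ^ (11 - j) ≤ d) (hgt : ∀ j', j' < j → x ^ (11 - j') > d) :
    pvG x d = 1 + pvG x (d - x ^ (11 - j)) := by
  have hxpos : (0 : Int) < x := by omega
  have htop : (0 : Int) < x ^ (11 : Nat) := pow_pos hxpos _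
  by_cases hj0 : j = 0
  · subst hj0
    simp only [Nat.sub_zero] at hle
    unfold pvG
    have hdiv : (d - x ^ (11 : Nat)) / x ^ (11 : Nat) = d / x ^ (11 : Nat) - 1 := by
      rw [show d - x ^ (11 : Nat) = d + (-1) * x ^ (11 : Nat) by ring,
        Int.add_mul_ediv_right d (-1) (by omega : x ^ (11 : Nat) ≠ 0)]
      ring
    have hmod : (d - x ^ (11 : Nat)) % x ^ (11 : Nat) = d % x ^ (11 : Nat) := by
      rw [show d - x ^ (11 : Nat) = d + x ^ (11 : Nat) * (-1) by ring,
        Int.add_mul_emod_self_left]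
    rw [hdiv, hmod]; ring
  · have hjpos : 0 < j := by omega
    have hlt : d < x ^ (11 : Nat) := by
      have := hgt 0 hjpos
      simpa using this
    have hlt' : d < x ^ (11 - j + 1) := by
      have h12 : 11 - (j - 1) = 11 - j + 1 := by omega
      have := hgt (j - 1) (by omega)
      rwa [h12] at this
    have hd2lt : d - x ^ (11 - j) < x ^ (11 : Nat) := by
      have hp : (0 : Int) < x ^ (11 - j) := pow_pos hxpos _
      omega
    unfold pvG
    rw [Int.ediv_eq_zero_of_lt (by omega) hlt, Int.emod_eq_of_lt (by omega) hlt,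
        Int.ediv_eq_zero_of_lt (by omega) hd2lt, Int.emod_eq_of_lt (by omega) hd2lt]
    have := pvS_sub_pow x hx (11 - j) d hle hlt'
    omega

-- A's outer loop, x ≥ 2: with the standing invariant it computes cnt + pvG x d
lemma pvLoopA_eq (x : Int) (hx : 2 ≤ x) : ∀ (fuel : Nat) (d : Int) (i : Nat) (cnt : Int),
    0 ≤ d → d.toNat < fuel → i < 12 → (∀ j', j' < i → x ^ (11 - j') > d) →
    pvLoopA (pvPowersA x) fuel i d cnt = cnt + pvG x d := by
  intro fuel
  induction fuel with
  | zero => intro d i cnt h0 hf; omega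
  | succ fuel ih =>
    intro d i cnt h0 hf hi hinv
    by_cases hd : d > 0
    · have hhit : ∃ j, i ≤ j ∧ j < (pvPowersA x).length ∧ (pvPowersA x).getD j 0 ≤ d := by
        refine ⟨11, by omega, by rw [powers_length]; omega, ?_⟩
        rw [powers_getD x 11 (by omega)]; simpa using hd
      obtain ⟨j, hsome, hij, hjlen, hjle, hmin⟩ := pvInnerA_spec (pvPowersA x) d i hhit
      rw [powers_length] at hjlen
      rw [powers_getD x j hjlen] at hjle
      have hinv' : ∀ j', j' < j → x ^ (11 - j') > d := by
        intro j' hj'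
        by_cases h : j' < i
        · exact hinv j' h
        · have := hmin j' (by omega) hj'
          rwa [powers_getD x j' (by omega)] at this
      have hppos : (0 : Int) < x ^ (11 - j) := pow_pos (by omega) _
      have hd' : 0 ≤ d - x ^ (11 - j) := by omega
      have hlt : d - x ^ (11 - j) < d := by omega
      rw [pvLoopA, if_pos hd, hsome]
      show pvLoopA (pvPowersA x) fuel j (d - (pvPowersA x).getD j 0) (cnt + 1) = cnt + pvG x d
      rw [powers_getD x j hjlen]
      rw [ih (d - x ^ (11 - j)) j (cnt + 1) hd' (by omega) hjlen
        (fun j' hj' => by have := hinv' j' hj'; omega)]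
      rw [pvG_step x d hx hd j hjlen hjle hinv']
      ring
    · have hd0 : d = 0 := by omega
      subst hd0
      rw [pvLoopA, if_neg hd, pvG_zero]
      ring

-- A's outer loop, x = 1: every power is 1, so it counts down by 1
lemma pvLoopA_one : ∀ (fuel : Nat) (d : Int) (i : Nat) (cnt : Int),
    0 ≤ d → d.toNat < fuel → i < 12 →
    pvLoopA (pvPowersA 1) fuel i d cnt = cnt + d := by
  intro fuel
  induction fuel with
  | zero => intro d i cnt h0 hf; omega
  | succ fuel ih =>
    intro d i cnt h0 hf hi
    by_cases hd : d > 0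
    · have hinner : pvInnerA (pvPowersA 1) d i = some i := by
        rw [pvInnerA, dif_pos (by rw [powers_length]; omega)]
        rw [powers_getD 1 i hi, one_pow]
        rw [if_neg (by omega)]
      rw [pvLoopA, if_pos hd, hinner]
      show pvLoopA (pvPowersA 1) fuel i (d - (pvPowersA 1).getD i 0) (cnt + 1) = cnt + d
      rw [powers_getD 1 i hi, one_pow]
      rw [ih (d - 1) i (cnt + 1) (by omega) (by omega) hi]
      ring
    · have hd0 : d = 0 := by omega
      subst hd0
      rw [pvLoopA, if_neg hd]
      ring

-- ===== VERDICT (by name: the statement is the Claim_ definition above) =====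
theorem minimal_summing_up_spec : Claim_equal_minimal_summing_up := by
  intro n x _ hpre
  unfold Spec_minimal_summing_up minimal_summing_up minimal_summing_up_alt
  by_cases hn : n ≤ 0
  · have : n.toNat = 0 := by omega
    rw [this, if_pos hn]
    rw [pvLoopA, if_neg (by omega)]
  · have hnpos : 0 < n := by omega
    have hx1 : 1 ≤ x := by rcases hpre with h | h <;> omega
    rw [if_neg hn]
    by_cases hx : x = 1
    · subst hx
      have htop : (1 : Int) ^ (11 : Nat) = 1 := one_pow 11
      rw [htop]
      have hfd : PySem.Int.floordiv n 1 = n := by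
        rw [PySem.Int.floordiv_eq_ediv_of_pos (by omega)]; simp
      have hmd : PySem.Int.mod n 1 = 0 := by
        rw [PySem.Int.mod_eq_emod_of_pos (by omega)]; simp
      simp only [hfd, hmd]
      rw [pvLoopA_one (n.toNat + 1) n 0 0 (by omega) (by omega) (by omega)]
      rw [pvDigitsB, if_neg (by simp)]
      ring
    · have hx2 : 2 ≤ x := by omega
      have htop : (0 : Int) < x ^ (11 : Nat) := pow_pos (by omega) _
      have hfd : PySem.Int.floordiv n (x ^ (11 : Nat)) = n / x ^ (11 : Nat) :=
        PySem.Int.floordiv_eq_ediv_of_pos htop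
      have hmd : PySem.Int.mod n (x ^ (11 : Nat)) = n % x ^ (11 : Nat) :=
        PySem.Int.mod_eq_emod_of_pos htop
      have hr0 : 0 ≤ n % x ^ (11 : Nat) := Int.emod_nonneg n (by omega)
      simp only [hfd, hmd]
      rw [pvLoopA_eq x hx2 (n.toNat + 1) n 0 0 (by omega) (by omega) (by omega)
        (fun j' hj' => by omega)]
      rw [pvDigitsB_eq x hx2 ((n % x ^ (11 : Nat)).toNat + 1) _ _ hr0 (by omega)]
      unfold pvG
      ring
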